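-- pv_equiv track=rewrite | github.com/phildsnutz/Xiphos-Vetting | scripts/run_ownership_control_benchmark.py | index_cases
-- ===== SOURCE A (Python) =====
-- def normalize_name(value: str) -> str:
--     return " ".join((value or "").strip().lower().split())
--
-- def index_cases(cases: list[dict]) -> dict[str, list[dict]]:
--     index: dict[str, list[dict]] = {}
--     for case in cases:
--         key = normalize_name(str(case.get("vendor_name") or case.get("name") or ""))
--         index.setdefault(key, []).append(case)
--     for key in index:
--         index[key].sort(key=lambda item: str(item.get("created_at") or ""), reverse=True)
--     return index
-- ===== SOURCE B (Python) =====
-- def normalize_name(value: str) -> str: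
--     return " ".join((value or "").strip().lower().split())
--
-- def index_cases(cases: list[dict]) -> dict[str, list[dict]]:
--     # No incremental dict building: dedup the keys once (first-occurrence order,
--     # matching A's insertion order), sort ALL cases once by date descending, then
--     # build each bucket as a filter over the globally sorted list; sort stability
--     # makes within-bucket order identical to A's per-bucket stable sort.
--     def key(case):
--         return normalize_name(str(case.get("vendor_name") or case.get("name") or ""))
--     ordered = sorted(cases, key=lambda item: str(item.get("created_at") or ""), reverse=True)
--     keys = list(dict.fromkeys(key(c) for c in cases))
--     return {k: [c for c in ordered if key(c) == k] for k in keys}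
-- ===== Notes on version B (the rewrite author's own statement) =====
-- stated objective: alternative
-- what changed: A folds cases into a dict of buckets and then stable-sorts each bucket; B builds no buckets incrementally at all: it dedups the normalized keys once, performs one global stable reverse sort of all cases, and produces each bucket as a filter of that sorted list (O(n*k) filtering vs A's dict grouping).
import Mathlib
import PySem

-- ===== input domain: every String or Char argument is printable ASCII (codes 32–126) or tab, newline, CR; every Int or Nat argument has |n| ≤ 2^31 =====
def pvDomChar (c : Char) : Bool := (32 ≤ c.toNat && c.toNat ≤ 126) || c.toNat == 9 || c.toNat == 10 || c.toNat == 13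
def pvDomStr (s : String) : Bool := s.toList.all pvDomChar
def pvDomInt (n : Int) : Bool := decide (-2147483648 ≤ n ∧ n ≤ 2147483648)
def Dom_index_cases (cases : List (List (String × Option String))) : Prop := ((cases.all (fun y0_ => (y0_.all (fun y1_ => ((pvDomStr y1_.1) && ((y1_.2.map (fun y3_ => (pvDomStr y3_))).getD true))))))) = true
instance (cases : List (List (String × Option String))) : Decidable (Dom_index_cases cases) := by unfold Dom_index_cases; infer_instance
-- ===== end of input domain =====

-- B replaces A's incremental dict-of-buckets (group then sort each bucket) with: dedup the keys
-- once, ONE global stable reverse sort, and one filter of the sorted list per key; objective: alternative decomposition.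

-- ===== PORT A =====
-- shared module helper: normalize_name(value) = " ".join((value or "").strip().lower().split())
def pvNormalizeName (value : String) : String :=
  -- (value or "") is the identity on a str argument ("" stays "")
  PySem.Str.join " " (PySem.Str.split₀ (PySem.Str.lower (PySem.Str.strip value)))

-- `d.get(k) or fallback` truthiness: a present, non-None, non-empty string is truthy
def pvTruthy (v : Option (Option String)) : Option String :=
  match v with
  | some (some s) => if s = "" then none else some s
  | _ => none

-- key = normalize_name(str(case.get("vendor_name") or case.get("name") or ""))
def pvCaseKey (case : List (String × Option String)) : String :=
  pvNormalizeName
    (match pvTruthy ((PySem.Dict.mk case).get? "vendor_name") with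
     | some s => s
     | none => (pvTruthy ((PySem.Dict.mk case).get? "name")).getD "")

-- sort key: str(item.get("created_at") or "")
def pvDateKey (case : List (String × Option String)) : String :=
  (pvTruthy ((PySem.Dict.mk case).get? "created_at")).getD ""

def index_cases (cases : List (List (String × Option String))) : List (String × List (List (String × Option String))) :=
  -- for case in cases: index.setdefault(key, []).append(case)
  ((cases.foldl
      (fun d case => d.modify (pvCaseKey case) [] (fun v => v ++ [case]))
      PySem.Dict.empty).items.map
    -- for key in index: index[key].sort(key=..., reverse=True)  (in-place per-bucket sort)
    (fun p => (p.1, PySem.List.sorted p.2 pvDateKey true)))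

-- ===== PORT B =====
def index_cases_alt (cases : List (List (String × Option String))) : List (String × List (List (String × Option String))) :=
  -- ordered = sorted(cases, key=lambda item: str(item.get("created_at") or ""), reverse=True)
  let ordered := PySem.List.sorted cases pvDateKey true
  -- keys = list(dict.fromkeys(key(c) for c in cases))
  let keys := PySem.List.dedup (cases.map pvCaseKey)
  -- {k: [c for c in ordered if key(c) == k] for k in keys}
  keys.map (fun k => (k, ordered.filter (fun c => pvCaseKey c == k)))

-- ===== PRECONDITION & SPEC =====
def Spec_index_cases (cases : List (List (String × Option String))) (out : List (String × List (List (String × Option String)))) : Prop := out = index_cases_alt cases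
instance (cases : List (List (String × Option String))) (out : List (String × List (List (String × Option String)))) : Decidable (Spec_index_cases cases out) := by unfold Spec_index_cases; infer_instance

-- ===== CLAIM (what is proved, stated in full; the proofs are below) =====
def Claim_equal_index_cases : Prop := ∀ (cases : List (List (String × Option String))), Dom_index_cases cases → Spec_index_cases cases (index_cases cases)

-- ===== LEMMAS AND PROOFS =====

-- inserting x before the whole list, when it sorts before every element
theorem pv_insertBy_all_before {α : Type} (before : α → α → Bool) (x : α) (l : List α)
    (h : ∀ z ∈ l, before x z = true) : PySem.List.insertBy before x l = x :: l := by
  cases l with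
  | nil => rfl
  | cons y ys => simp [PySem.List.insertBy, h y (by simp)]

-- filter commutes with a single stable insertion, on an accumulator on which `before x` is monotone
theorem pv_filter_insertBy {α : Type} (before : α → α → Bool) (x : α) (p : α → Bool) :
    ∀ acc : List α, acc.Pairwise (fun a b => before x a = true → before x b = true) →
    (PySem.List.insertBy before x acc).filter p =
      if p x then PySem.List.insertBy before x (acc.filter p) else acc.filter p := by
  intro acc
  induction acc with
  | nil =>
    intro _
    by_cases hpx : p x <;> simp [PySem.List.insertBy, hpx]
  | cons y ys ih =>
    intro hp
    rcases List.pairwise_cons.mp hp with ⟨hy, hys⟩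
    by_cases hb : before x y = true
    · have hall : ∀ z ∈ y :: ys, before x z = true := by
        intro z hz
        rcases List.mem_cons.mp hz with rfl | hz
        · exact hb
        · exact hy z hz hb
      have hall' : ∀ z ∈ (y :: ys).filter p, before x z = true := by
        intro z hz; exact hall z (List.mem_of_mem_filter hz)
      rw [show PySem.List.insertBy before x (y :: ys) = x :: y :: ys by
            simpa using pv_insertBy_all_before before x (y :: ys) hall]
      by_cases hpx : p x
      · rw [pv_insertBy_all_before before x _ hall']
        simp [List.filter_cons, hpx]
      · simp [List.filter_cons, hpx]
    · have hstep : PySem.List.insertBy before x (y :: ys) = y :: PySem.List.insertBy before x ys := by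
        simp [PySem.List.insertBy, hb]
      rw [hstep]
      by_cases hpy : p y
      · by_cases hpx : p x
        · simp only [List.filter_cons, hpy, if_pos, ih hys, hpx]
          have : PySem.List.insertBy before x (y :: ys.filter p) =
              y :: PySem.List.insertBy before x (ys.filter p) := by
            simp [PySem.List.insertBy, hb]
          simp [this]
        · simp [hpy, ih hys, hpx]
      · by_cases hpx : p x <;> simp [hpy, ih hys, hpx]

-- filter commutes with Python's stable reverse sort
theorem pv_filter_sorted_rev {α : Type} (key : α → String) (p : α → Bool) (xs : List α) :
    (PySem.List.sorted xs key true).filter p = PySem.List.sorted (xs.filter p) key true := by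
  induction xs using List.reverseRecOn with
  | nil => rfl
  | append_singleton xs x ih =>
    rw [PySem.List.sorted_rev_eq_foldl_insertBy, List.foldl_append, List.foldl_cons, List.foldl_nil,
        ← PySem.List.sorted_rev_eq_foldl_insertBy]
    have hmono : (PySem.List.sorted xs key true).Pairwise
        (fun a b => (decide (key a < key x)) = true → (decide (key b < key x)) = true) := by
      refine (PySem.List.sorted_pairwise_rev xs key).imp ?_
      intro a b hba ha
      simp only [decide_eq_true_eq] at ha ⊢
      exact lt_of_le_of_lt hba ha
    rw [pv_filter_insertBy (fun a b => decide (key b < key a)) x p _ hmono, ih,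
        List.filter_append]
    by_cases hpx : p x
    · simp only [List.filter_cons, hpx, if_pos, List.filter_nil]
      rw [PySem.List.sorted_rev_eq_foldl_insertBy (xs.filter p ++ [x]),
          List.foldl_append, List.foldl_cons, List.foldl_nil,
          ← PySem.List.sorted_rev_eq_foldl_insertBy]
    · simp [hpx]

-- A's grouping loop, rewritten into the pair-keyed shape the library lemma speaks about
theorem pv_grp_getD (l : List (List (String × Option String)))
    (d : PySem.Dict String (List (List (String × Option String)))) (k : String) :
    (l.foldl (fun d case => d.modify (pvCaseKey case) [] (fun v => v ++ [case])) d).getD k []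
      = d.getD k [] ++ l.filter (fun c => pvCaseKey c == k) := by
  rw [show (l.foldl (fun d case => d.modify (pvCaseKey case) [] (fun v => v ++ [case])) d)
        = (l.map (fun c => (pvCaseKey c, c))).foldl
            (fun d p => d.modify p.1 [] (fun v => v ++ [p.2])) d from by rw [List.foldl_map],
      PySem.Dict.getD_foldl_modify_append]
  congr 1
  rw [List.filter_map, List.map_map]
  simp [Function.comp_def]

-- A's value, in B's shape up to the filter/sort swap
theorem pv_A_canon (cases : List (List (String × Option String))) :
    index_cases cases
      = (PySem.Set.ofList (cases.map pvCaseKey)).map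
          (fun k => (k, PySem.List.sorted (cases.filter (fun c => pvCaseKey c == k)) pvDateKey true)) := by
  unfold index_cases
  have hkeys : (cases.foldl (fun d case => d.modify (pvCaseKey case) [] (fun v => v ++ [case]))
      PySem.Dict.empty).keys = PySem.Set.ofList (cases.map pvCaseKey) := by
    rw [PySem.Dict.keys_foldl_modify_key cases pvCaseKey [] (fun _ c v => v ++ [c]) PySem.Dict.empty,
        PySem.Dict.keys_empty, PySem.Set.update_nil_left]
  have hnodup : (cases.foldl (fun d case => d.modify (pvCaseKey case) [] (fun v => v ++ [case]))
      PySem.Dict.empty).keys.Nodup :=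
    PySem.Dict.nodup_keys_foldl_modify_key cases pvCaseKey []
      (fun _ c v => v ++ [c]) PySem.Dict.empty PySem.Dict.nodup_keys_empty
  rw [PySem.Dict.items_eq_map_keys _ hnodup [], hkeys, List.map_map]
  refine List.map_congr_left ?_
  intro k _
  simp only [Function.comp]
  rw [pv_grp_getD, PySem.Dict.getD_empty, List.nil_append]

-- ===== VERDICT (by name: the statement is the Claim_ definition above) =====
theorem index_cases_spec : Claim_equal_index_cases := by
  intro cases _
  unfold Spec_index_cases
  rw [pv_A_canon]
  unfold index_cases_alt
  rw [PySem.List.dedup_eq_ofList]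
  refine List.map_congr_left ?_
  intro k _
  rw [pv_filter_sorted_rev]
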